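-- pv_equiv track=rewrite | github.com/rqzz/Anwendungsprojekt-Code_Classification | TrainingData/ai_PRIMES2_1.py | chef_conjecture
-- ===== SOURCE A (Python) =====
-- from math import sqrt
--
-- def is_prime(n):
--     if n < 2:
--         return False
--     for i in range(2, int(sqrt(n)) + 1):
--         if n % i == 0:
--             return False
--     return True
--
-- def chef_conjecture(n):
--     for i in range(2, n):
--         if is_prime(i):
--             for j in range(2, n):
--                 if is_prime(j):
--                     for k in range(2, n):
--                         if is_prime(k):
--                             if i + j**2 + k**3 == n:
--                                 return i, j, k
--     return 0, 0, 0
-- ===== SOURCE B (Python) =====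
-- def _is_prime(m):
--     if m < 2:
--         return False
--     if m % 2 == 0:
--         return m == 2
--     d = 3
--     while d * d <= m:
--         if m % d == 0:
--             return False
--         d += 2
--     return True
--
-- def _icbrt(r):
--     k = 0
--     while (k + 1) ** 3 <= r:
--         k += 1
--     return k
--
-- def chef_conjecture(n):
--     for i in range(2, n):
--         if _is_prime(i):
--             j = 2
--             while i + j * j + 8 <= n:
--                 if _is_prime(j):
--                     r = n - i - j * j
--                     k = _icbrt(r)
--                     if k * k * k == r and _is_prime(k):
--                         return i, j, k
--                 j += 1
--     return 0, 0, 0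
-- ===== Notes on version B (the rewrite author's own statement) =====
-- stated objective: faster
-- what changed: A scans all primes k in a third nested loop; B solves k from n - i - j² with an integer cube root and stops the j loop once n - i - j² is smaller than the least prime cube, turning the triple loop into a double loop with j bounded by √n; the odd-only trial-division prime test replaces A's full scan up to int(sqrt(n)).
import Mathlib
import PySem

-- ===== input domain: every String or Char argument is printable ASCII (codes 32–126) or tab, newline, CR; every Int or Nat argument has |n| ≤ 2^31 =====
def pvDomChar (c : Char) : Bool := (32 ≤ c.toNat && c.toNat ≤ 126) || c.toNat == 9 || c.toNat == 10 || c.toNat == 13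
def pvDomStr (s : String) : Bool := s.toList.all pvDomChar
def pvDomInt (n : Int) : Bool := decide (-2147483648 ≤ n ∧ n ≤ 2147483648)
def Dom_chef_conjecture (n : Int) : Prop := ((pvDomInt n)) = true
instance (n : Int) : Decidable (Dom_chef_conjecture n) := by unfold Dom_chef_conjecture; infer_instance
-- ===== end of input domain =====

-- B replaces A's innermost prime scan by an integer cube root of n - i - j², and stops the
-- j loop as soon as n - i - j² is below the least prime cube; objective: faster.

-- ===== PORT A =====
-- is_prime: trial division over range(2, int(sqrt(n)) + 1).
-- int(sqrt(n)) is ported as Int.sqrt n: for |n| ≤ 2^31 the float value can differ from the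
-- integer square root only by +1 at n = k²-1-like points, where the extra candidate k never
-- divides n, so the function's value is identical.
def pvTrialA (n : Int) : List Int → Bool
  | [] => true
  | i :: rest => if PySem.Int.mod n i == 0 then false else pvTrialA n rest

def pvIsPrimeA (n : Int) : Bool :=
  if n < 2 then false
  else pvTrialA n (PySem.List.pyRange 2 (Int.sqrt n + 1) 1)

def pvKLoopA (n i j : Int) : List Int → Option (List Int)
  | [] => none
  | k :: ks =>
    if pvIsPrimeA k then
      if i + j ^ 2 + k ^ 3 == n then some [i, j, k] else pvKLoopA n i j ks
    else pvKLoopA n i j ks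

def pvJLoopA (n i : Int) : List Int → Option (List Int)
  | [] => none
  | j :: js =>
    if pvIsPrimeA j then
      match pvKLoopA n i j (PySem.List.pyRange 2 n 1) with
      | some t => some t
      | none => pvJLoopA n i js
    else pvJLoopA n i js

def pvILoopA (n : Int) : List Int → Option (List Int)
  | [] => none
  | i :: is =>
    if pvIsPrimeA i then
      match pvJLoopA n i (PySem.List.pyRange 2 n 1) with
      | some t => some t
      | none => pvILoopA n is
    else pvILoopA n is

def chef_conjecture (n : Int) : List Int :=
  (pvILoopA n (PySem.List.pyRange 2 n 1)).getD [0, 0, 0]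

-- ===== PORT B =====
-- _is_prime: 2 handled separately, then odd trial divisors 3, 5, … while d*d ≤ m
-- (the while loop is ported with fuel m.toNat, sufficient since the loop stops at d² > m).
def pvOddTrialB (m : Int) : Nat → Int → Bool
  | 0, _ => true
  | fuel + 1, d =>
    if d * d ≤ m then
      if PySem.Int.mod m d == 0 then false else pvOddTrialB m fuel (d + 2)
    else true

def pvIsPrimeB (m : Int) : Bool :=
  if m < 2 then false
  else if PySem.Int.mod m 2 == 0 then m == 2
  else pvOddTrialB m m.toNat 3

-- _icbrt: k = 0; while (k+1)**3 <= r: k += 1 (fuel r.toNat, sufficient since k ≤ r).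
def pvIcbrtAux (r : Int) : Nat → Int → Int
  | 0, k => k
  | fuel + 1, k => if (k + 1) ^ 3 ≤ r then pvIcbrtAux r fuel (k + 1) else k

def pvIcbrt (r : Int) : Int := pvIcbrtAux r r.toNat 0

-- inner while loop on j (fuel n.toNat, sufficient since the loop stops at i + j² + 8 > n)
def pvJLoopB (n i : Int) : Nat → Int → Option (List Int)
  | 0, _ => none
  | fuel + 1, j =>
    if i + j * j + 8 ≤ n then
      if pvIsPrimeB j then
        let r := n - i - j * j
        let k := pvIcbrt r
        if k * k * k == r && pvIsPrimeB k then some [i, j, k]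
        else pvJLoopB n i fuel (j + 1)
      else pvJLoopB n i fuel (j + 1)
    else none

def pvILoopB (n : Int) : List Int → Option (List Int)
  | [] => none
  | i :: is =>
    if pvIsPrimeB i then
      match pvJLoopB n i n.toNat 2 with
      | some t => some t
      | none => pvILoopB n is
    else pvILoopB n is

def chef_conjecture_alt (n : Int) : List Int :=
  (pvILoopB n (PySem.List.pyRange 2 n 1)).getD [0, 0, 0]

-- ===== PRECONDITION & SPEC =====
def Spec_chef_conjecture (n : Int) (out : List Int) : Prop := out = chef_conjecture_alt n
instance (n : Int) (out : List Int) : Decidable (Spec_chef_conjecture n out) := by unfold Spec_chef_conjecture; infer_instance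

-- ===== CLAIM (what is proved, stated in full; the proofs are below) =====
def Claim_equal_chef_conjecture : Prop := ∀ (n : Int), Dom_chef_conjecture n → Spec_chef_conjecture n (chef_conjecture n)

-- ===== LEMMAS AND PROOFS =====

-- small arithmetic helpers
theorem pv_sq_mono {a b : Int} (ha : 0 ≤ a) (hab : a ≤ b) : a * a ≤ b * b :=
  mul_le_mul hab hab ha (by omega)

theorem pv_four_le_sq {k : Int} (hk : 2 ≤ k) : 4 ≤ k * k := by
  have := pv_sq_mono (by norm_num : (0:Int) ≤ 2) hk
  linarith

theorem pv_cube_ge_8 {k : Int} (hk : 2 ≤ k) : 8 ≤ k ^ 3 := by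
  have := pow_le_pow_left₀ (show (0:Int) ≤ 2 by norm_num) hk 3
  norm_num at this
  exact this

theorem pv_le_cube {k : Int} (hk : 2 ≤ k) : k ≤ k ^ 3 := by
  have h4 : 4 ≤ k * k := pv_four_le_sq hk
  have he : k ^ 3 = k * (k * k) := by ring
  nlinarith [mul_le_mul_of_nonneg_left h4 (show (0:Int) ≤ k by omega)]

-- square-root bracket
theorem pv_int_le_sqrt {e m : Int} (he : 0 ≤ e) (hm : 0 ≤ m) : e ≤ Int.sqrt m ↔ e * e ≤ m := by
  lift e to ℕ using he
  lift m to ℕ using hm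
  rw [Int.sqrt_natCast]
  exact_mod_cast Nat.le_sqrt

-- A's trial-division loop is an `all`
theorem pvTrialA_eq_all (n : Int) (l : List Int) :
    pvTrialA n l = l.all (fun d => !(PySem.Int.mod n d == 0)) := by
  induction l with
  | nil => rfl
  | cons d rest ih =>
    by_cases h : PySem.Int.mod n d == 0 <;> simp [pvTrialA, h, ih]

theorem pvIsPrimeA_iff (m : Int) (hm : 2 ≤ m) :
    pvIsPrimeA m = true ↔ ∀ d : Int, 2 ≤ d → d * d ≤ m → ¬ PySem.Int.mod m d = 0 := by
  have hm0 : ¬ m < 2 := by omega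
  simp only [pvIsPrimeA, if_neg hm0, pvTrialA_eq_all, List.all_eq_true,
    PySem.List.mem_pyRange_one, Bool.not_eq_eq_eq_not, Bool.not_true, beq_eq_false_iff_ne, ne_eq]
  constructor
  · intro h d hd hdm
    exact h d ⟨hd, by have := (pv_int_le_sqrt (by omega : (0:Int) ≤ d) (by omega : (0:Int) ≤ m)).2 hdm; omega⟩
  · intro h d hd
    exact h d hd.1 ((pv_int_le_sqrt (by omega : (0:Int) ≤ d) (by omega : (0:Int) ≤ m)).1 (by omega))

theorem pvOddTrialB_iff (m : Int) :
    ∀ (fuel : Nat) (d : Int), 0 < d → m < (d + 2 * fuel) * (d + 2 * fuel) →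
    (pvOddTrialB m fuel d = true ↔
      ∀ e : Int, d ≤ e → (2 ∣ (e - d)) → e * e ≤ m → ¬ PySem.Int.mod m e = 0) := by
  intro fuel
  induction fuel with
  | zero =>
    intro d hd hfuel
    push_cast at hfuel
    simp only [pvOddTrialB, true_iff]
    intro e hde _ hem _
    have := pv_sq_mono (by omega : (0:Int) ≤ d) hde
    linarith
  | succ fuel ih =>
    intro d hd hfuel
    have hb : (d + 2 * ((fuel : Int) + 1)) * (d + 2 * ((fuel : Int) + 1))
        = ((d + 2) + 2 * fuel) * ((d + 2) + 2 * fuel) := by ring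
    push_cast at hfuel
    rw [hb] at hfuel
    simp only [pvOddTrialB]
    by_cases hdd : d * d ≤ m
    · rw [if_pos hdd]
      by_cases hmod : PySem.Int.mod m d = 0
      · rw [if_pos (by simpa using hmod)]
        simp only [Bool.false_eq_true, false_iff]
        intro hforall
        exact hforall d (le_refl d) (by omega) hdd hmod
      · rw [if_neg (by simpa using hmod)]
        rw [ih (d + 2) (by omega) hfuel]
        constructor
        · intro h e hde hpar hem
          by_cases he : e = d
          · subst he; exact hmod
          · exact h e (by omega) (by omega) hem
        · intro h e hde hpar hem
          exact h e (by omega) (by omega) hem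
    · rw [if_neg hdd]
      simp only [true_iff]
      intro e hde _ hem
      have := pv_sq_mono (by omega : (0:Int) ≤ d) hde
      linarith

theorem pvIsPrimeB_iff (m : Int) (hm : 2 ≤ m) :
    pvIsPrimeB m = true ↔ ∀ d : Int, 2 ≤ d → d * d ≤ m → ¬ PySem.Int.mod m d = 0 := by
  have hm0 : ¬ m < 2 := by omega
  simp only [pvIsPrimeB, if_neg hm0]
  by_cases h2 : PySem.Int.mod m 2 = 0
  · rw [if_pos (by simpa using h2)]
    have hdvd : (2 : Int) ∣ m := (PySem.Int.mod_eq_zero_iff_dvd m 2).1 h2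
    by_cases hm2 : m = 2
    · subst hm2
      simp only [beq_self_eq_true, true_iff]
      intro d hd hdm
      have := pv_four_le_sq hd
      linarith
    · have hm4 : 4 ≤ m := by omega
      simp only [show (m == 2) = false by simpa using hm2, Bool.false_eq_true, false_iff]
      intro hforall
      exact hforall 2 (le_refl 2) (by omega) h2
  · rw [if_neg (by simpa using h2)]
    have hfuel : m < (3 + 2 * (m.toNat : Int)) * (3 + 2 * (m.toNat : Int)) := by
      have h1 : m ≤ (m.toNat : Int) := Int.self_le_toNat m
      have h0 : (0 : Int) ≤ (m.toNat : Int) := by positivity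
      nlinarith
    rw [pvOddTrialB_iff m m.toNat 3 (by omega) hfuel]
    constructor
    · intro h d hd hdm hmod
      rcases Int.even_or_odd d with he | ho
      · obtain ⟨c, hc⟩ := he
        have hdm2 : (2 : Int) ∣ m := dvd_trans ⟨c, by omega⟩ ((PySem.Int.mod_eq_zero_iff_dvd m d).1 hmod)
        exact h2 ((PySem.Int.mod_eq_zero_iff_dvd m 2).2 hdm2)
      · obtain ⟨c, hc⟩ := ho
        exact h d (by omega) (by omega) hdm hmod
    · intro h e hde hpar hem
      exact h e (by omega) hem

theorem pvPrime_eq (m : Int) : pvIsPrimeA m = pvIsPrimeB m := by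
  by_cases hm : m < 2
  · simp [pvIsPrimeA, pvIsPrimeB, hm]
  · rw [Bool.eq_iff_iff, pvIsPrimeA_iff m (by omega), pvIsPrimeB_iff m (by omega)]

-- prime ⇒ ≥ 2
theorem pvIsPrimeA_two_le {m : Int} (h : pvIsPrimeA m = true) : 2 ≤ m := by
  by_contra hc
  simp [pvIsPrimeA, show m < 2 by omega] at h

-- cube root
theorem pvIcbrtAux_eq (r k0 : Int) (h0 : k0 ^ 3 ≤ r) (h1 : r < (k0 + 1) ^ 3) :
    ∀ (fuel : Nat) (k : Int), 0 ≤ k → k ≤ k0 → k0 ≤ k + fuel → pvIcbrtAux r fuel k = k0 := by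
  intro fuel
  induction fuel with
  | zero =>
    intro k hk0 hkk0 hle
    have : k = k0 := by omega
    subst this
    rfl
  | succ fuel ih =>
    intro k hk0 hkk0 hle
    simp only [pvIcbrtAux]
    by_cases hk : k = k0
    · subst hk
      rw [if_neg (by omega)]
    · have hlt : k + 1 ≤ k0 := by omega
      have hcube : (k + 1) ^ 3 ≤ k0 ^ 3 := pow_le_pow_left₀ (by omega) hlt 3
      rw [if_pos (le_trans hcube h0)]
      exact ih (k + 1) (by omega) hlt (by push_cast at hle ⊢; omega)

theorem pvIcbrt_of_cube {r k : Int} (hk : 2 ≤ k) (hr : k ^ 3 = r) : pvIcbrt r = k := by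
  have h1 : r < (k + 1) ^ 3 := by
    rw [← hr]
    exact pow_lt_pow_left₀ (by omega) (by omega) (by omega)
  have hkr : k ≤ r := hr ▸ pv_le_cube hk
  exact pvIcbrtAux_eq r k (le_of_eq hr) h1 r.toNat 0 (le_refl 0) (by omega) (by omega)

-- find? characterisations
theorem pvKLoopA_eq_find (n i j : Int) (l : List Int) :
    pvKLoopA n i j l =
      (l.find? (fun k => pvIsPrimeA k && (i + j ^ 2 + k ^ 3 == n))).map (fun k => [i, j, k]) := by
  induction l with
  | nil => rfl
  | cons k ks ih =>
    by_cases h1 : pvIsPrimeA k <;> by_cases h2 : i + j ^ 2 + k ^ 3 == n <;>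
      simp [pvKLoopA, List.find?, h1, h2, ih]

theorem pvFind?_unique {p : Int → Bool} {k0 : Int} (h : ∀ x, p x = true → x = k0) (l : List Int) :
    l.find? p = if k0 ∈ l ∧ p k0 = true then some k0 else none := by
  induction l with
  | nil => simp
  | cons x xs ih =>
    by_cases hx : p x = true
    · have hxk := h x hx
      subst hxk
      rw [List.find?_cons_of_pos hx, if_pos ⟨List.mem_cons_self, hx⟩]
    · rw [List.find?_cons_of_neg (by simpa using hx), ih]
      by_cases hpk : p k0 = true
      · have hne : k0 ≠ x := fun he => hx (he ▸ hpk)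
        simp [List.mem_cons, hpk, hne]
      · simp [hpk]

-- the inner k-scan of A, when r = n - i - j² ≥ 8, equals B's cube-root test
theorem pvInner_eq (n i j : Int) (hi : 2 ≤ i) (hj : 2 ≤ j) :
    pvKLoopA n i j (PySem.List.pyRange 2 n 1) =
      (if pvIcbrt (n - i - j * j) * pvIcbrt (n - i - j * j) * pvIcbrt (n - i - j * j) == (n - i - j * j)
          && pvIsPrimeB (pvIcbrt (n - i - j * j))
       then some [i, j, pvIcbrt (n - i - j * j)] else none) := by
  set r := n - i - j * j with hrdef
  set k0 := pvIcbrt r with hk0def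
  have hsq : j ^ 2 = j * j := by ring
  have huniq : ∀ x : Int, (pvIsPrimeA x && (i + j ^ 2 + x ^ 3 == n)) = true → x = k0 := by
    intro x hx
    rw [Bool.and_eq_true, beq_iff_eq] at hx
    have hx2 : 2 ≤ x := pvIsPrimeA_two_le hx.1
    have hxr : x ^ 3 = r := by rw [hrdef]; linarith [hx.2]
    rw [hk0def, pvIcbrt_of_cube hx2 hxr]
  rw [pvKLoopA_eq_find, pvFind?_unique huniq]
  by_cases hbc : (k0 * k0 * k0 == r && pvIsPrimeB k0) = true
  · rw [Bool.and_eq_true, beq_iff_eq] at hbc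
    have hpk : pvIsPrimeA k0 = true := (pvPrime_eq k0).symm ▸ hbc.2
    have hk02 : 2 ≤ k0 := pvIsPrimeA_two_le hpk
    have hcube : k0 ^ 3 = r := by have : k0 ^ 3 = k0 * k0 * k0 := by ring
                                  linarith [hbc.1]
    have hkn : k0 < n := by have := pv_le_cube hk02
                            have := pv_four_le_sq hj
                            linarith
    rw [if_pos ⟨(PySem.List.mem_pyRange_one).2 ⟨by omega, hkn⟩,
        by rw [Bool.and_eq_true, beq_iff_eq]; exact ⟨hpk, by linarith⟩⟩]
    rw [if_pos (by rw [Bool.and_eq_true, beq_iff_eq]; exact ⟨hbc.1, hbc.2⟩)]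
    rfl
  · rw [if_neg, if_neg hbc]
    · rfl
    · rintro ⟨hmem, hp⟩
      rw [Bool.and_eq_true, beq_iff_eq] at hp
      have hk02 : 2 ≤ k0 := pvIsPrimeA_two_le hp.1
      apply hbc
      rw [Bool.and_eq_true, beq_iff_eq]
      have : k0 ^ 3 = k0 * k0 * k0 := by ring
      exact ⟨by linarith [hp.2], (pvPrime_eq k0) ▸ hp.1⟩

-- when r < 8 there is no prime cube, so A's inner scan finds nothing
theorem pvInner_none (n i j : Int) (hlt : n - i - j * j < 8) :
    pvKLoopA n i j (PySem.List.pyRange 2 n 1) = none := by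
  rw [pvKLoopA_eq_find]
  rw [List.find?_eq_none.2]
  · rfl
  · intro x _ hx
    rw [Bool.and_eq_true, beq_iff_eq] at hx
    have hx2 : 2 ≤ x := pvIsPrimeA_two_le hx.1
    have h8 : 8 ≤ x ^ 3 := pv_cube_ge_8 hx2
    have hsq : j ^ 2 = j * j := by ring
    linarith [hx.2, hlt]

theorem pvJLoopA_none (n i : Int) (l : List Int)
    (h : ∀ j ∈ l, pvKLoopA n i j (PySem.List.pyRange 2 n 1) = none) :
    pvJLoopA n i l = none := by
  induction l with
  | nil => rfl
  | cons j js ih =>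
    have hj := h j (by simp)
    by_cases hp : pvIsPrimeA j <;>
      simp [pvJLoopA, hp, hj, ih (fun x hx => h x (by simp [hx]))]

theorem pvJLoops (n i : Int) (hi : 2 ≤ i) :
    ∀ (fuel : Nat) (j : Int), 2 ≤ j → n < i + (j + fuel) * (j + fuel) + 8 →
    pvJLoopA n i (PySem.List.pyRange j n 1) = pvJLoopB n i fuel j := by
  intro fuel
  induction fuel with
  | zero =>
    intro j hj hfuel
    push_cast at hfuel
    rw [pvJLoopA_none]
    · rfl
    · intro j' hj'
      have hm := (PySem.List.mem_pyRange_one).1 hj'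
      have := pv_sq_mono (by omega : (0:Int) ≤ j) hm.1
      exact pvInner_none n i j' (by linarith)
  | succ fuel ih =>
    intro j hj hfuel
    push_cast at hfuel
    by_cases hc : i + j * j + 8 ≤ n
    · have hjj : 2 * (j - 1) ≤ j * (j - 1) := mul_le_mul_of_nonneg_right hj (by omega)
      have hjn : j < n := by nlinarith
      rw [PySem.List.pyRange_one_cons hjn]
      simp only [pvJLoopA, pvJLoopB, if_pos hc]
      rw [pvPrime_eq j]
      by_cases hp : pvIsPrimeB j = true
      · rw [if_pos hp, if_pos hp]
        rw [pvInner_eq n i j hi hj]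
        by_cases hbc : (pvIcbrt (n - i - j * j) * pvIcbrt (n - i - j * j) * pvIcbrt (n - i - j * j) == (n - i - j * j)
            && pvIsPrimeB (pvIcbrt (n - i - j * j))) = true
        · rw [if_pos hbc, if_pos hbc]
        · rw [if_neg hbc, if_neg hbc]
          show pvJLoopA n i (PySem.List.pyRange (j + 1) n 1) = pvJLoopB n i fuel (j + 1)
          exact ih (j + 1) (by omega) (by linarith)
      · rw [if_neg hp, if_neg hp]
        exact ih (j + 1) (by omega) (by linarith)
    · have hB : pvJLoopB n i (fuel + 1) j = none := by simp only [pvJLoopB, if_neg hc]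
      rw [hB, pvJLoopA_none]
      intro j' hj'
      have hm := (PySem.List.mem_pyRange_one).1 hj'
      have := pv_sq_mono (by omega : (0:Int) ≤ j) hm.1
      exact pvInner_none n i j' (by linarith)

theorem pvILoops (n : Int) :
    ∀ l : List Int, (∀ i ∈ l, 2 ≤ i) → pvILoopA n l = pvILoopB n l := by
  intro l hl
  induction l with
  | nil => rfl
  | cons i is ih =>
    have hi : 2 ≤ i := hl i (by simp)
    simp only [pvILoopA, pvILoopB]
    rw [pvPrime_eq i]
    by_cases hp : pvIsPrimeB i = true
    · rw [if_pos hp, if_pos hp]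
      rw [pvJLoops n i hi n.toNat 2 (by norm_num) (by
        have h1 : n ≤ (n.toNat : Int) := Int.self_le_toNat n
        have h0 : (0 : Int) ≤ (n.toNat : Int) := Int.natCast_nonneg _
        nlinarith [mul_nonneg h0 h0])]
      cases hres : pvJLoopB n i n.toNat 2 with
      | some t => rfl
      | none => exact ih (fun x hx => hl x (by simp [hx]))
    · rw [if_neg hp, if_neg hp]
      exact ih (fun x hx => hl x (by simp [hx]))


-- ===== VERDICT (by name: the statement is the Claim_ definition above) =====
theorem chef_conjecture_spec : Claim_equal_chef_conjecture := by
  intro n _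
  show chef_conjecture n = chef_conjecture_alt n
  unfold chef_conjecture chef_conjecture_alt
  rw [pvILoops n _ (fun i hi => ((PySem.List.mem_pyRange_one).1 hi).1)]
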